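-- pv_equiv track=rewrite | github.com/pglaum/aoc-2024 | 07/day07.py | find_true_eval
-- ===== SOURCE A (Python) =====
-- def find_true_eval(target: int, numbers: list[int]):
--     if len(numbers) == 2:
--         return numbers[0] + numbers[1] == target or numbers[0] * numbers[1] == target
--
--     mediate = numbers[0] + numbers[1]
--     if mediate <= target and find_true_eval(target, [mediate] + numbers[2:]):
--         return True
--
--     mediate = numbers[0] * numbers[1]
--     if mediate <= target and find_true_eval(target, [mediate] + numbers[2:]):
--         return True
--
--     return False
-- ===== SOURCE B (Python) =====
-- def find_true_eval(target: int, numbers: list[int]):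
--     a, b = numbers[0], numbers[1]
--     reachable = {r for r in (a + b, a * b) if r <= target}
--     for num in numbers[2:]:
--         reachable = {r for v in reachable for r in (v + num, v * num) if r <= target}
--     return target in reachable
-- ===== Notes on version B (the rewrite author's own statement) =====
-- stated objective: alternative
-- what changed: Replaced A's recursive depth-first search over operator choices by an iterative left-to-right fold that maintains the set of all reachable intermediate values (same <= target pruning) and checks membership of the target at the end.
-- outside the precondition, e.g. on find_true_eval(5, []): A raises IndexError, B raises IndexError; on find_true_eval(5, [5]): A raises IndexError, B raises IndexError
import Mathlib
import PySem

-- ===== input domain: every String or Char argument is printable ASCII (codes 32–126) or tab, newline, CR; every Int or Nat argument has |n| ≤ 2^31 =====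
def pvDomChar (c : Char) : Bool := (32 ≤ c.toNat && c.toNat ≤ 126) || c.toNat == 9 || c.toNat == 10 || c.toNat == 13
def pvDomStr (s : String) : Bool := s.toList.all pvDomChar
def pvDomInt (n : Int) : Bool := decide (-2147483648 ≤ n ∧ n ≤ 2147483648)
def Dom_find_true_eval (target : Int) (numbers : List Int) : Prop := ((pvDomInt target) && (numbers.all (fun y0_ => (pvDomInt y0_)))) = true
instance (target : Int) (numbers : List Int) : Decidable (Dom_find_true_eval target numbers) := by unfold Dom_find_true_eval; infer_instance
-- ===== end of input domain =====

-- B replaces A's recursive depth-first search by an iterative fold maintaining the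
-- set of all reachable intermediate values (same ≤ target pruning); objective: alternative.

-- ===== PORT A =====
-- literal transliteration of A: base case len == 2, then try '+' and '*' in order
def find_true_eval (target : Int) (numbers : List Int) : Bool :=
  match numbers with
  | [a, b] => (a + b == target) || (a * b == target)
  | a :: b :: c :: rest =>
      (decide (a + b ≤ target) && find_true_eval target ((a + b) :: c :: rest)) ||
      (decide (a * b ≤ target) && find_true_eval target ((a * b) :: c :: rest))
  | _ => false   -- Python raises IndexError on fewer than 2 numbers; excluded by Pre_
termination_by numbers.length

-- ===== PORT B =====
-- literal transliteration of B: a, b = numbers[0], numbers[1]; fold the set of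
-- reachable values over numbers[2:]; IndexError (none) cases are excluded by Pre_
def find_true_eval_alt (target : Int) (numbers : List Int) : Bool :=
  match PySem.List.pyGet? numbers 0, PySem.List.pyGet? numbers 1 with
  | some a, some b =>
      let init : PySem.Set Int :=
        PySem.Set.ofList (([a + b, a * b]).filter (fun r => decide (r ≤ target)))
      let reachable :=
        (PySem.List.slice numbers (some 2) none).foldl (fun S num =>
          PySem.Set.ofList (S.flatMap (fun v =>
            ([v + num, v * num]).filter (fun r => decide (r ≤ target))))) init
      PySem.Set.contains reachable target
  | _, _ => false

-- ===== PRECONDITION & SPEC =====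
-- A (and B) index numbers[0] and numbers[1] unconditionally: IndexError on shorter lists.
def Pre_find_true_eval (target : Int) (numbers : List Int) : Prop := 2 ≤ numbers.length
instance (target : Int) (numbers : List Int) : Decidable (Pre_find_true_eval target numbers) := by unfold Pre_find_true_eval; infer_instance
def pvWitness_find_true_eval : Int × List Int := (5, [2, 3])

def Spec_find_true_eval (target : Int) (numbers : List Int) (out : Bool) : Prop := out = find_true_eval_alt target numbers
instance (target : Int) (numbers : List Int) (out : Bool) : Decidable (Spec_find_true_eval target numbers out) := by unfold Spec_find_true_eval; infer_instance

-- ===== CLAIM (what is proved, stated in full; the proofs are below) =====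
def Claim_equal_find_true_eval : Prop := ∀ (target : Int) (numbers : List Int), Dom_find_true_eval target numbers → Pre_find_true_eval target numbers → Spec_find_true_eval target numbers (find_true_eval target numbers)

-- ===== LEMMAS AND PROOFS =====

-- reachability of `t` from accumulated value `v` through the remaining numbers,
-- with A's/B's `≤ t` pruning
def pvReach (t v : Int) : List Int → Prop
  | [] => v = t
  | n :: rest => (v + n ≤ t ∧ pvReach t (v + n) rest) ∨ (v * n ≤ t ∧ pvReach t (v * n) rest)

theorem pvA_iff_reach (t : Int) (rest : List Int) : ∀ a b : Int,
    find_true_eval t (a :: b :: rest) = true ↔ pvReach t a (b :: rest) := by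
  induction rest with
  | nil =>
      intro a b
      simp [find_true_eval, pvReach]
      constructor
      · rintro (h | h) <;> [exact Or.inl ⟨le_of_eq h, h⟩; exact Or.inr ⟨le_of_eq h, h⟩]
      · rintro (⟨_, h⟩ | ⟨_, h⟩) <;> [exact Or.inl h; exact Or.inr h]
  | cons c rest ih =>
      intro a b
      rw [find_true_eval]
      simp only [Bool.or_eq_true, Bool.and_eq_true, decide_eq_true_iff, ih]
      rfl

theorem pvMem_fold (t : Int) (nums : List Int) : ∀ S : List Int,
    (t ∈ nums.foldl (fun S num =>
        PySem.Set.ofList (S.flatMap (fun v =>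
          ([v + num, v * num]).filter (fun r => decide (r ≤ t))))) S)
    ↔ ∃ v ∈ S, pvReach t v nums := by
  induction nums with
  | nil =>
      intro S
      simp [pvReach]
  | cons n rest ih =>
      intro S
      rw [List.foldl_cons, ih]
      constructor
      · rintro ⟨w, hw, hr⟩
        rw [PySem.Set.mem_ofList, List.mem_flatMap] at hw
        obtain ⟨v, hv, hw⟩ := hw
        simp only [List.mem_filter, List.mem_cons, List.not_mem_nil, or_false,
          decide_eq_true_iff] at hw
        obtain ⟨(rfl | rfl), hle⟩ := hw
        · exact ⟨v, hv, Or.inl ⟨hle, hr⟩⟩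
        · exact ⟨v, hv, Or.inr ⟨hle, hr⟩⟩
      · rintro ⟨v, hv, (⟨hle, hr⟩ | ⟨hle, hr⟩)⟩
        · refine ⟨v + n, ?_, hr⟩
          rw [PySem.Set.mem_ofList, List.mem_flatMap]
          exact ⟨v, hv, by simp [hle]⟩
        · refine ⟨v * n, ?_, hr⟩
          rw [PySem.Set.mem_ofList, List.mem_flatMap]
          exact ⟨v, hv, by simp [hle]⟩

theorem pvAlt_iff_reach (t a b : Int) (rest : List Int) :
    find_true_eval_alt t (a :: b :: rest) = true ↔ pvReach t a (b :: rest) := by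
  have h0 : PySem.List.pyGet? (a :: b :: rest) (0 : Int) = some a := by
    rw [show (0 : Int) = ((0 : Nat) : Int) from rfl, PySem.List.pyGet?_natCast]; rfl
  have h1 : PySem.List.pyGet? (a :: b :: rest) (1 : Int) = some b := by
    rw [show (1 : Int) = ((1 : Nat) : Int) from rfl, PySem.List.pyGet?_natCast]; rfl
  have h2 : PySem.List.slice (a :: b :: rest) (some 2) none = rest := by
    have := PySem.List.slice_from_natCast (a :: b :: rest) 2
    simpa using this
  unfold find_true_eval_alt
  rw [h0, h1, h2]
  rw [PySem.Set.contains_iff, pvMem_fold]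
  constructor
  · rintro ⟨v, hv, hr⟩
    rw [PySem.Set.mem_ofList] at hv
    simp only [List.mem_filter, List.mem_cons, List.not_mem_nil, or_false,
      decide_eq_true_iff] at hv
    obtain ⟨(rfl | rfl), hle⟩ := hv
    · exact Or.inl ⟨hle, hr⟩
    · exact Or.inr ⟨hle, hr⟩
  · rintro (⟨hle, hr⟩ | ⟨hle, hr⟩)
    · refine ⟨a + b, ?_, hr⟩
      rw [PySem.Set.mem_ofList]; simp [hle]
    · refine ⟨a * b, ?_, hr⟩
      rw [PySem.Set.mem_ofList]; simp [hle]

-- ===== VERDICT (by name: the statement is the Claim_ definition above) =====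
theorem find_true_eval_spec : Claim_equal_find_true_eval := by
  intro target numbers _ hpre
  unfold Spec_find_true_eval
  match numbers with
  | [] => simp [Pre_find_true_eval] at hpre
  | [_] => simp [Pre_find_true_eval] at hpre
  | a :: b :: rest =>
      rw [Bool.eq_iff_iff, pvA_iff_reach, pvAlt_iff_reach]
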